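-- pv_equiv track=rewrite | github.com/pypi-data/pypi-mirror-404 | packages/cde-render/cde_render-4.4.0.tar.gz/cde_render-4.4.0/cde_render/util.py | _int_to_words_filter
-- ===== SOURCE A (Python) =====
-- def _small_int_to_words(num: int) -> str:
--     """Convert a small integer into a written representation.
--
--     Helper for the general function.
--     """
--     if num < 0 or num > 999:
--         raise ValueError("Out of supported scope.")
--     digits = tuple((num // 10**i) % 10 for i in range(3))
--     atoms = ("null", "ein", "zwei", "drei", "vier", "fünf", "sechs",
--                 "sieben", "acht", "neun", "zehn", "elf", "zwölf", "dreizehn",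
--                 "vierzehn", "fünfzehn", "sechzehn", "siebzehn", "achtzehn",
--                 "neunzehn")  # fmt: skip
--     tens = ("", "", "zwanzig", "dreißig", "vierzig", "fünfzig", "sechzig",
--             "siebzig", "achtzig", "neunzig")  # fmt: skip
--     ret = ""
--     if digits[2]:
--         ret += atoms[digits[2]] + "hundert"
--     if num % 100 < 20:
--         if num % 100:
--             ret += atoms[num % 100]
--         return ret
--     if digits[0]:
--         ret += atoms[digits[0]]
--     if digits[0] and digits[1]:
--         ret += "und"
--     if digits[1]:
--         ret += tens[digits[1]]
--     return ret
--
-- def _int_to_words_filter(num: int) -> str: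
--     """Convert an integer into a written representation.
--
--     This is for the usage such as '2 apples' -> 'two apples'.
--     """
--     if num < 0 or num > 999999:
--         raise ValueError("Out of supported scope.")
--     if num == 0:
--         return "null"
--     multipliers = ("", "tausend")
--     number_words = []
--     tmp = num
--     while tmp > 0:
--         number_words.append(_small_int_to_words(tmp % 1000))
--         tmp = tmp // 1000
--     ret = ""
--     for number_word, multiplier in reversed(tuple(zip(number_words, multipliers))):
--         if number_word != "null":
--             ret += number_word + multiplier
--     return ret
-- ===== SOURCE B (Python) =====
-- _ATOMS = ("null", "ein", "zwei", "drei", "vier", "fünf", "sechs",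
--           "sieben", "acht", "neun", "zehn", "elf", "zwölf", "dreizehn",
--           "vierzehn", "fünfzehn", "sechzehn", "siebzehn", "achtzehn",
--           "neunzehn")
-- _TENS = ("", "", "zwanzig", "dreißig", "vierzig", "fünfzig", "sechzig",
--          "siebzig", "achtzig", "neunzig")
--
--
-- def _under_hundred(n: int) -> str:
--     """Words for 1..99."""
--     if n < 20:
--         return _ATOMS[n]
--     u = n % 10
--     t = n // 10
--     return (_ATOMS[u] + "und" + _TENS[t]) if u else _TENS[t]
--
--
-- def _small(n: int) -> str:
--     """Words for 1..999."""
--     h = n // 100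
--     r = n % 100
--     pre = _ATOMS[h] + "hundert" if h else ""
--     return pre + (_under_hundred(r) if r else "")
--
--
-- def _int_to_words_filter(num: int) -> str:
--     if num < 0 or num > 999999:
--         raise ValueError("Out of supported scope.")
--     if num == 0:
--         return "null"
--     thousands = num // 1000
--     rest = num % 1000
--     ret = _small(thousands) + "tausend" if thousands else ""
--     if rest:
--         ret += _small(rest)
--     return ret
-- ===== Notes on version B (the rewrite author's own statement) =====
-- stated objective: simpler
-- what changed: Replaces the while-loop over thousand-groups with reversed(zip(...)) recombination and the != 'null' filter by a direct divmod-by-1000 two-case construction, and restructures the 0-999 helper into an explicit hundreds prefix plus a separate 1-99 helper instead of the digit-tuple/branch cascade.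
import Mathlib
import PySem

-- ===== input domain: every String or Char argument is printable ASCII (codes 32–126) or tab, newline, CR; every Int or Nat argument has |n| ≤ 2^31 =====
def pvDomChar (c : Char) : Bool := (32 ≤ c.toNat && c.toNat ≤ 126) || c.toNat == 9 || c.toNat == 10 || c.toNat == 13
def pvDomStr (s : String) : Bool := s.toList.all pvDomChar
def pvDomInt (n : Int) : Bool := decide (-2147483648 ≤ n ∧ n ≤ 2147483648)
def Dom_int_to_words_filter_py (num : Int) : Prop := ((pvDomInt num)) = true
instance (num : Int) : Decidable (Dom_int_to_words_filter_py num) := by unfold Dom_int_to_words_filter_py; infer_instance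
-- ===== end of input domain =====

-- B replaces A's while-loop/zip/reversed group driver by a direct divmod-by-1000 split
-- and restructures the 0-999 helper (hundreds prefix + separate 1-99 helper); objective: simpler.

-- ===== PORT A =====
def pyAtoms : List String :=
  ["null", "ein", "zwei", "drei", "vier", "fünf", "sechs",
   "sieben", "acht", "neun", "zehn", "elf", "zwölf", "dreizehn",
   "vierzehn", "fünfzehn", "sechzehn", "siebzehn", "achtzehn", "neunzehn"]
def pyTens : List String :=
  ["", "", "zwanzig", "dreißig", "vierzig", "fünfzig", "sechzig",
   "siebzig", "achtzig", "neunzig"]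

-- _small_int_to_words; none = the ValueError branch
def smallA (num : Int) : Option String :=
  if num < 0 ∨ num > 999 then none
  else
    -- digits = tuple((num // 10**i) % 10 for i in range(3)); i is 0,1,2 so 10^i.toNat is exact
    let digits : List Int :=
      (PySem.List.pyRange 0 3 1).map (fun i => PySem.Int.mod (PySem.Int.floordiv num (10 ^ i.toNat)) 10)
    -- tuple indexing; indices are in range here, so IndexError (none) never occurs
    let dig (i : Int) : Int := (PySem.List.pyGet? digits i).getD 0
    let atom (i : Int) : String := (PySem.List.pyGet? pyAtoms i).getD ""
    let ten (i : Int) : String := (PySem.List.pyGet? pyTens i).getD ""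
    let ret : String := ""
    let ret := if dig 2 ≠ 0 then ret ++ atom (dig 2) ++ "hundert" else ret
    if PySem.Int.mod num 100 < 20 then
      some (if PySem.Int.mod num 100 ≠ 0 then ret ++ atom (PySem.Int.mod num 100) else ret)
    else
      let ret := if dig 0 ≠ 0 then ret ++ atom (dig 0) else ret
      let ret := if dig 0 ≠ 0 ∧ dig 1 ≠ 0 then ret ++ "und" else ret
      let ret := if dig 1 ≠ 0 then ret ++ ten (dig 1) else ret
      some ret

-- the while loop of _int_to_words_filter, building number_words;
-- smallA's ValueError is unreachable (0 ≤ tmp % 1000 ≤ 999), hence .getD ""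
def loopA (tmp : Int) (acc : List String) : List String :=
  if _h : tmp > 0 then
    loopA (PySem.Int.floordiv tmp 1000) (acc ++ [(smallA (PySem.Int.mod tmp 1000)).getD ""])
  else acc
termination_by tmp.toNat
decreasing_by
  have h1000 : PySem.Int.floordiv tmp 1000 = tmp / 1000 :=
    PySem.Int.floordiv_eq_ediv_of_pos (by omega)
  rw [h1000]; omega

def int_to_words_filter_py (num : Int) : String :=
  if num < 0 ∨ num > 999999 then ""  -- ValueError: excluded by Pre_
  else if num = 0 then "null"
  else
    let multipliers : List String := ["", "tausend"]
    let number_words := loopA num []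
    (List.reverse (number_words.zip multipliers)).foldl
      (fun ret p => if p.1 ≠ "null" then ret ++ p.1 ++ p.2 else ret) ""

-- ===== PORT B =====
def underHundredB (n : Int) : String :=
  if n < 20 then (PySem.List.pyGet? pyAtoms n).getD ""
  else
    let u := PySem.Int.mod n 10
    let t := PySem.Int.floordiv n 10
    if u ≠ 0 then (PySem.List.pyGet? pyAtoms u).getD "" ++ "und" ++ (PySem.List.pyGet? pyTens t).getD ""
    else (PySem.List.pyGet? pyTens t).getD ""

def smallB (n : Int) : String :=
  let h := PySem.Int.floordiv n 100
  let r := PySem.Int.mod n 100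
  let pre := if h ≠ 0 then (PySem.List.pyGet? pyAtoms h).getD "" ++ "hundert" else ""
  pre ++ (if r ≠ 0 then underHundredB r else "")

def int_to_words_filter_py_alt (num : Int) : String :=
  if num < 0 ∨ num > 999999 then ""  -- ValueError: excluded by Pre_
  else if num = 0 then "null"
  else
    let thousands := PySem.Int.floordiv num 1000
    let rest := PySem.Int.mod num 1000
    let ret := if thousands ≠ 0 then smallB thousands ++ "tausend" else ""
    if rest ≠ 0 then ret ++ smallB rest else ret

-- ===== PRECONDITION & SPEC =====
-- Pre_: exactly the inputs where A returns (outside, A raises ValueError)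
def Pre_int_to_words_filter_py (num : Int) : Prop := 0 ≤ num ∧ num ≤ 999999
instance (num : Int) : Decidable (Pre_int_to_words_filter_py num) := by
  unfold Pre_int_to_words_filter_py; infer_instance
def pvWitness_int_to_words_filter_py : Int := (21345)

def Spec_int_to_words_filter_py (num : Int) (out : String) : Prop := out = int_to_words_filter_py_alt num
instance (num : Int) (out : String) : Decidable (Spec_int_to_words_filter_py num out) := by unfold Spec_int_to_words_filter_py; infer_instance

-- ===== CLAIM (what is proved, stated in full; the proofs are below) =====
def Claim_equal_int_to_words_filter_py : Prop := ∀ (num : Int), Dom_int_to_words_filter_py num → Pre_int_to_words_filter_py num → Spec_int_to_words_filter_py num (int_to_words_filter_py num)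

-- ===== LEMMAS AND PROOFS =====
set_option maxRecDepth 4000

-- both 0-999 helpers reduced to the same normal form (symbolic; no enumeration)
theorem smallA_eq_smallB (x : Int) (h0 : 0 ≤ x) (h9 : x ≤ 999) :
    (smallA x).getD "" = smallB x := by
  have hr3 : PySem.List.pyRange 0 3 1 = [0, 1, 2] := by decide
  have m10 : ∀ a : Int, PySem.Int.mod a 10 = a % 10 :=
    fun a => PySem.Int.mod_eq_emod_of_pos (by omega)
  have m100 : ∀ a : Int, PySem.Int.mod a 100 = a % 100 :=
    fun a => PySem.Int.mod_eq_emod_of_pos (by omega)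
  have d1 : ∀ a : Int, PySem.Int.floordiv a 1 = a / 1 :=
    fun a => PySem.Int.floordiv_eq_ediv_of_pos (by omega)
  have d10 : ∀ a : Int, PySem.Int.floordiv a 10 = a / 10 :=
    fun a => PySem.Int.floordiv_eq_ediv_of_pos (by omega)
  have d100 : ∀ a : Int, PySem.Int.floordiv a 100 = a / 100 :=
    fun a => PySem.Int.floordiv_eq_ediv_of_pos (by omega)
  have g1 : x / 1 = x := Int.ediv_one x
  have g2 : x / 100 % 10 = x / 100 := by omega
  have g3 : x % 100 % 10 = x % 10 := by omega
  have g4 : x % 100 / 10 = x / 10 % 10 := by omega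
  have hpow0 : (10 : Int) ^ (0 : Int).toNat = 1 := by decide
  have hpow1 : (10 : Int) ^ (1 : Int).toNat = 10 := by decide
  have hpow2 : (10 : Int) ^ (2 : Int).toNat = 100 := by decide
  have pg0 : ∀ a b c : Int, PySem.List.pyGet? [a, b, c] 0 = some a := by
    intro a b c; simp [PySem.List.pyGet?, PySem.List.pyIdx?]
  have pg1 : ∀ a b c : Int, PySem.List.pyGet? [a, b, c] 1 = some b := by
    intro a b c; simp [PySem.List.pyGet?, PySem.List.pyIdx?]
  have pg2 : ∀ a b c : Int, PySem.List.pyGet? [a, b, c] 2 = some c := by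
    intro a b c; simp [PySem.List.pyGet?, PySem.List.pyIdx?]
  simp only [smallA, smallB, underHundredB, hr3, List.map, hpow0, hpow1, hpow2,
    m10, m100, d1, d10, d100, g1, pg0, pg1, pg2, Option.getD_some,
    if_neg (show ¬(x < 0 ∨ x > 999) by omega)]
  simp only [g2, g3, g4]
  by_cases hlt : x % 100 < 20
  · by_cases hre : x % 100 = 0
    · have hu : x % 10 = 0 := by omega
      by_cases hh : x / 100 = 0 <;>
        simp [hlt, hre, hu, hh, String.append_assoc, String.empty_append,
          String.append_empty]
    · by_cases hh : x / 100 = 0 <;>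
        simp [hlt, hre, hh, String.append_assoc, String.empty_append,
          String.append_empty]
  · have hre : ¬ x % 100 = 0 := by omega
    have ht : ¬ x / 10 % 10 = 0 := by omega
    by_cases hu : x % 10 = 0 <;> by_cases hh : x / 100 = 0 <;>
      simp [hlt, hre, ht, hu, hh, String.append_assoc, String.empty_append,
        String.append_empty]

theorem smallB_zero : smallB 0 = "" := by decide

theorem smallB_low_ne_null : ∀ k : Fin 99, smallB ((k : Int) + 1) ≠ "null" := by decide

theorem smallB_ne_null (x : Int) (h1 : 1 ≤ x) (h9 : x ≤ 999) : smallB x ≠ "null" := by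
  by_cases hh : x / 100 = 0
  · have hx : x ≤ 99 := by omega
    have : x = ((⟨(x - 1).toNat, by omega⟩ : Fin 99) : Int) + 1 := by
      simp; omega
    rw [this]; exact smallB_low_ne_null _
  · -- the word contains "hundert" (7 chars): too long to be "null"
    intro heq
    have hlen := congrArg String.length heq
    have d100 : PySem.Int.floordiv x 100 = x / 100 :=
      PySem.Int.floordiv_eq_ediv_of_pos (by omega)
    simp only [smallB, d100, if_pos hh] at hlen
    rw [String.length_append, String.length_append] at hlen
    have c1 : "hundert".length = 7 := by decide
    have c2 : "null".length = 4 := by decide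
    rw [c1, c2] at hlen
    omega

theorem loopA_unfold (tmp : Int) (acc : List String) (h : tmp > 0) :
    loopA tmp acc = loopA (PySem.Int.floordiv tmp 1000)
      (acc ++ [(smallA (PySem.Int.mod tmp 1000)).getD ""]) := by
  rw [loopA]; simp [h]

theorem loopA_stop (tmp : Int) (acc : List String) (h : ¬ tmp > 0) : loopA tmp acc = acc := by
  rw [loopA]; simp [h]

-- ===== VERDICT (by name: the statement is the Claim_ definition above) =====
theorem int_to_words_filter_py_spec : Claim_equal_int_to_words_filter_py := by
  intro num _ hpre
  obtain ⟨h0, h6⟩ := hpre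
  unfold Spec_int_to_words_filter_py
  by_cases hz : num = 0
  · simp [int_to_words_filter_py, int_to_words_filter_py_alt, hz]
  · have hpos : 0 < num := by omega
    have hdiv : PySem.Int.floordiv num 1000 = num / 1000 :=
      PySem.Int.floordiv_eq_ediv_of_pos (by omega)
    have hmod : PySem.Int.mod num 1000 = num % 1000 :=
      PySem.Int.mod_eq_emod_of_pos (by omega)
    have hmlt : num % 1000 < 1000 := Int.emod_lt_of_pos num (by omega)
    have hm0 : 0 ≤ num % 1000 := Int.emod_nonneg num (by omega)
    by_cases hth : num ≤ 999
    · -- one group: num // 1000 = 0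
      have hq : num / 1000 = 0 := by omega
      have hm : num % 1000 = num := by omega
      have he := smallA_eq_smallB num h0 (by omega)
      have hn := smallB_ne_null num (by omega) (by omega)
      simp only [int_to_words_filter_py, int_to_words_filter_py_alt]
      rw [if_neg (by omega), if_neg hz, if_neg (by omega), if_neg hz]
      rw [loopA_unfold _ _ hpos, hdiv, hmod, hq, hm, loopA_stop _ _ (by omega)]
      rw [he]
      simp [List.zip, List.zipWith, hn]
      exact fun h => absurd h hz
    · -- two groups: 1 ≤ num // 1000 ≤ 999
      have hq1 : 1 ≤ num / 1000 := by omega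
      have hq9 : num / 1000 ≤ 999 := by omega
      have hqd : PySem.Int.floordiv (num / 1000) 1000 = (num / 1000) / 1000 :=
        PySem.Int.floordiv_eq_ediv_of_pos (by omega)
      have hqm : PySem.Int.mod (num / 1000) 1000 = (num / 1000) % 1000 :=
        PySem.Int.mod_eq_emod_of_pos (by omega)
      have hqq : (num / 1000) / 1000 = 0 := by omega
      have hqmm : (num / 1000) % 1000 = num / 1000 := by omega
      have heL := smallA_eq_smallB (num % 1000) hm0 (by omega)
      have heH := smallA_eq_smallB (num / 1000) (by omega) (by omega)
      have hnH := smallB_ne_null (num / 1000) (by omega) (by omega)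
      simp only [int_to_words_filter_py, int_to_words_filter_py_alt]
      rw [if_neg (by omega), if_neg hz, if_neg (by omega), if_neg hz]
      rw [loopA_unfold _ _ hpos, hdiv, hmod,
          loopA_unfold _ _ (by omega), hqd, hqm, hqq, hqmm, loopA_stop _ _ (by omega)]
      rw [heL, heH]
      have hq0 : ¬ num / 1000 = 0 := by omega
      by_cases hr0 : num % 1000 = 0
      · rw [hr0, smallB_zero]
        simp [List.zip, List.zipWith, hnH, hq0]
      · have hnL := smallB_ne_null (num % 1000) (by omega) (by omega)
        simp [List.zip, List.zipWith, hnL, hnH, hr0, hq0, String.append_assoc,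
          String.empty_append, String.append_empty]
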